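-- pv_equiv track=rewrite | github.com/prasantk47/governexplus | core/ara/graph/rule_generator.py | _looks_like_conflict
-- ===== SOURCE A (Python) =====
-- def _looks_like_conflict(action1: str, action2: str) -> bool:
--     """
--     Heuristic to determine if two actions might conflict.
--
--     In production, this would use domain knowledge and ML.
--     """
--     # Keywords indicating potential conflicts
--     create_keywords = {"CREATE", "ADD", "INSERT", "NEW", "HIRE"}
--     approve_keywords = {"APPROVE", "RELEASE", "POST", "EXECUTE", "PAY"}
--     modify_keywords = {"MODIFY", "CHANGE", "UPDATE", "EDIT"}
--     delete_keywords = {"DELETE", "REMOVE", "RETIRE", "TERMINATE"}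
--
--     action1_upper = action1.upper()
--     action2_upper = action2.upper()
--
--     # Create + Approve conflict
--     if any(k in action1_upper for k in create_keywords):
--         if any(k in action2_upper for k in approve_keywords):
--             return True
--
--     if any(k in action2_upper for k in create_keywords):
--         if any(k in action1_upper for k in approve_keywords):
--             return True
--
--     # Create + Delete conflict (lifecycle)
--     if any(k in action1_upper for k in create_keywords):
--         if any(k in action2_upper for k in delete_keywords):
--             return True
--
--     # Modify + Approve conflict
--     if any(k in action1_upper for k in modify_keywords):
--         if any(k in action2_upper for k in approve_keywords):
--             return True
--
--     # Same business object different operations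
--     # (simplified - in production, use actual business object mapping)
--     words1 = set(action1_upper.replace("_", " ").split())
--     words2 = set(action2_upper.replace("_", " ").split())
--     common_objects = words1 & words2 - {"THE", "A", "AN", "AND", "OR"}
--
--     if common_objects:
--         # Same object, different operations
--         ops1 = words1 - common_objects
--         ops2 = words2 - common_objects
--         if ops1 != ops2:
--             return True
--
--     return False
-- ===== SOURCE B (Python) =====
-- _CATS = (
--     ("create", ("CREATE", "ADD", "INSERT", "NEW", "HIRE")),
--     ("approve", ("APPROVE", "RELEASE", "POST", "EXECUTE", "PAY")),
--     ("modify", ("MODIFY", "CHANGE", "UPDATE", "EDIT")),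
--     ("delete", ("DELETE", "REMOVE", "RETIRE", "TERMINATE")),
-- )
-- _RULES = (("create", "approve"), ("approve", "create"),
--           ("create", "delete"), ("modify", "approve"))
-- _STOP = ("THE", "A", "AN", "AND", "OR")
--
-- def _looks_like_conflict(action1: str, action2: str) -> bool:
--     u1 = action1.upper()
--     u2 = action2.upper()
--     # Data-driven: the set of conflict-category names each action matches,
--     # then a table of directed rules over those category names.
--     cats1 = {name for name, kws in _CATS if any(k in u1 for k in kws)}
--     cats2 = {name for name, kws in _CATS if any(k in u2 for k in kws)}
--     if any(r1 in cats1 and r2 in cats2 for r1, r2 in _RULES):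
--         return True
--     # Same-object check via one dict of side bitmasks: for each word record on
--     # which side(s) it occurs (bit 1 = action1, bit 2 = action2).
--     side = {}
--     for w in u1.replace("_", " ").split():
--         side[w] = side.get(w, 0) | 1
--     for w in u2.replace("_", " ").split():
--         side[w] = side.get(w, 0) | 2
--     shares = False   # some non-stopword word occurs on both sides
--     same = True      # every word occurs on both sides (equal word sets)
--     for w, m in side.items():
--         if m == 3:
--             if w not in _STOP:
--                 shares = True
--         else:
--             same = False
--     return shares and not same
-- ===== Notes on version B (the rewrite author's own statement) =====
-- stated objective: alternative
-- what changed: B replaces A's four hard-coded nested keyword ifs by a data-driven category table plus a directed-rule table scanned in one any(), and replaces A's set-algebra same-object test (intersection/differences of set objects) by a single dict mapping each word to a side bitmask, with one loop over the dict deciding 'shares a non-stopword' and 'word sets equal'.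
import Mathlib
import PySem

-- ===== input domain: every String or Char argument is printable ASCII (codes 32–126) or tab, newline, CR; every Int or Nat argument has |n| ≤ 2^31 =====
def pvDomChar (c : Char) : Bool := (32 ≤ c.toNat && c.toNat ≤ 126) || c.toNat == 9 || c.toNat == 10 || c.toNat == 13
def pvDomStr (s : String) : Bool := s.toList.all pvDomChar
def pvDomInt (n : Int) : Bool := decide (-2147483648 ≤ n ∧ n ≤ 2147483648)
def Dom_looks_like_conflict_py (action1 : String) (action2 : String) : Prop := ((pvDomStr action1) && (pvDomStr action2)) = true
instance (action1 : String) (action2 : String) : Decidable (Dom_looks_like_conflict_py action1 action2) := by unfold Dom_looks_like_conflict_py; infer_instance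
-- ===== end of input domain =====

-- B replaces A's four hard-coded keyword ifs by a category table + directed-rule table,
-- and A's set-algebra same-object test by one dict of per-word side bitmasks; objective:
-- alternative (data-driven tables and a single dict pass instead of set objects).

-- ===== PORT A =====
def looks_like_conflict_py (action1 : String) (action2 : String) : Bool :=
  let create_keywords : List String := ["CREATE", "ADD", "INSERT", "NEW", "HIRE"]
  let approve_keywords : List String := ["APPROVE", "RELEASE", "POST", "EXECUTE", "PAY"]
  let modify_keywords : List String := ["MODIFY", "CHANGE", "UPDATE", "EDIT"]
  let delete_keywords : List String := ["DELETE", "REMOVE", "RETIRE", "TERMINATE"]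
  let action1_upper := PySem.Str.upper action1
  let action2_upper := PySem.Str.upper action2
  -- Create + Approve conflict (both directions)
  if (create_keywords.any fun k => PySem.Str.isIn k action1_upper) &&
     (approve_keywords.any fun k => PySem.Str.isIn k action2_upper) then true
  else if (create_keywords.any fun k => PySem.Str.isIn k action2_upper) &&
          (approve_keywords.any fun k => PySem.Str.isIn k action1_upper) then true
  -- Create + Delete conflict (lifecycle)
  else if (create_keywords.any fun k => PySem.Str.isIn k action1_upper) &&
          (delete_keywords.any fun k => PySem.Str.isIn k action2_upper) then true
  -- Modify + Approve conflict
  else if (modify_keywords.any fun k => PySem.Str.isIn k action1_upper) &&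
          (approve_keywords.any fun k => PySem.Str.isIn k action2_upper) then true
  else
    -- Same business object different operations
    let words1 := PySem.Set.ofList (PySem.Str.split₀ (PySem.Str.replace action1_upper "_" " "))
    let words2 := PySem.Set.ofList (PySem.Str.split₀ (PySem.Str.replace action2_upper "_" " "))
    -- Python precedence: words1 & (words2 - {...})
    let common_objects := PySem.Set.inter words1 (PySem.Set.diff words2 (PySem.Set.ofList ["THE", "A", "AN", "AND", "OR"]))
    if !common_objects.isEmpty then
      let ops1 := PySem.Set.diff words1 common_objects
      let ops2 := PySem.Set.diff words2 common_objects
      if !(PySem.Set.equal ops1 ops2) then true else false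
    else false

-- ===== PORT B =====
def pvCatsB : List (String × List String) :=
  [("create", ["CREATE", "ADD", "INSERT", "NEW", "HIRE"]),
   ("approve", ["APPROVE", "RELEASE", "POST", "EXECUTE", "PAY"]),
   ("modify", ["MODIFY", "CHANGE", "UPDATE", "EDIT"]),
   ("delete", ["DELETE", "REMOVE", "RETIRE", "TERMINATE"])]

def pvRulesB : List (String × String) :=
  [("create", "approve"), ("approve", "create"), ("create", "delete"), ("modify", "approve")]

def pvStopB : List String := ["THE", "A", "AN", "AND", "OR"]

def looks_like_conflict_py_alt (action1 : String) (action2 : String) : Bool :=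
  let u1 := PySem.Str.upper action1
  let u2 := PySem.Str.upper action2
  -- category-name sets each action matches
  let cats1 : PySem.Set String :=
    PySem.Set.ofList ((pvCatsB.filter fun p => p.2.any fun k => PySem.Str.isIn k u1).map Prod.fst)
  let cats2 : PySem.Set String :=
    PySem.Set.ofList ((pvCatsB.filter fun p => p.2.any fun k => PySem.Str.isIn k u2).map Prod.fst)
  if pvRulesB.any (fun r => PySem.Set.contains cats1 r.1 && PySem.Set.contains cats2 r.2) then true
  else
    -- one dict pass: each word ↦ bitmask of the side(s) it occurs on
    let side0 := (PySem.Str.split₀ (PySem.Str.replace u1 "_" " ")).foldl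
      (fun (d : PySem.Dict String Int) w => d.insert w (PySem.Int.bor (d.getD w 0) 1)) PySem.Dict.empty
    let side := (PySem.Str.split₀ (PySem.Str.replace u2 "_" " ")).foldl
      (fun (d : PySem.Dict String Int) w => d.insert w (PySem.Int.bor (d.getD w 0) 2)) side0
    let r := side.items.foldl
      (fun (acc : Bool × Bool) wm =>
        if wm.2 == 3 then
          (if !(pvStopB.contains wm.1) then (true, acc.2) else acc)
        else (acc.1, false))
      (false, true)
    r.1 && !r.2

-- ===== PRECONDITION & SPEC =====
def Spec_looks_like_conflict_py (action1 : String) (action2 : String) (out : Bool) : Prop := out = looks_like_conflict_py_alt action1 action2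
instance (action1 : String) (action2 : String) (out : Bool) : Decidable (Spec_looks_like_conflict_py action1 action2 out) := by unfold Spec_looks_like_conflict_py; infer_instance

-- ===== CLAIM (what is proved, stated in full; the proofs are below) =====
def Claim_equal_looks_like_conflict_py : Prop := ∀ (action1 : String) (action2 : String), Dom_looks_like_conflict_py action1 action2 → Spec_looks_like_conflict_py action1 action2 (looks_like_conflict_py action1 action2)

-- ===== LEMMAS AND PROOFS =====

-- First word loop: every entry of the dict becomes mask 1.
theorem pv_fold1_getD (t : List String) (d : PySem.Dict String Int)
    (h : ∀ v, d.getD v 0 = 0 ∨ d.getD v 0 = 1) (v : String) :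
    (t.foldl (fun (d : PySem.Dict String Int) w => d.insert w (PySem.Int.bor (d.getD w 0) 1)) d).getD v 0
      = if v ∈ t then 1 else d.getD v 0 := by
  induction t generalizing d with
  | nil => simp
  | cons w t ih =>
    simp only [List.foldl_cons]
    have hb : PySem.Int.bor (d.getD w 0) 1 = 1 := by
      rcases h w with hw | hw <;> rw [hw] <;> decide
    have h' : ∀ v, (d.insert w (PySem.Int.bor (d.getD w 0) 1)).getD v 0 = 0 ∨
        (d.insert w (PySem.Int.bor (d.getD w 0) 1)).getD v 0 = 1 := by
      intro v
      rw [PySem.Dict.getD_insert]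
      split
      · right; exact hb
      · exact h v
    rw [ih _ h']
    rw [PySem.Dict.getD_insert]
    by_cases hv : v ∈ t
    · simp [hv]
    · by_cases hvw : v = w
      · simp [hvw, hb]
      · simp [hv, hvw]

-- Second word loop: existing entries get bit 2 or-ed in.
theorem pv_fold2_getD (t : List String) (d : PySem.Dict String Int)
    (h : ∀ v, d.getD v 0 = 0 ∨ d.getD v 0 = 1 ∨ d.getD v 0 = 2 ∨ d.getD v 0 = 3) (v : String) :
    (t.foldl (fun (d : PySem.Dict String Int) w => d.insert w (PySem.Int.bor (d.getD w 0) 2)) d).getD v 0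
      = if v ∈ t then PySem.Int.bor (d.getD v 0) 2 else d.getD v 0 := by
  induction t generalizing d with
  | nil => simp
  | cons w t ih =>
    simp only [List.foldl_cons]
    have h' : ∀ v, (d.insert w (PySem.Int.bor (d.getD w 0) 2)).getD v 0 = 0 ∨
        (d.insert w (PySem.Int.bor (d.getD w 0) 2)).getD v 0 = 1 ∨
        (d.insert w (PySem.Int.bor (d.getD w 0) 2)).getD v 0 = 2 ∨
        (d.insert w (PySem.Int.bor (d.getD w 0) 2)).getD v 0 = 3 := by
      intro v
      rw [PySem.Dict.getD_insert]
      split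
      · rcases h w with hw | hw | hw | hw <;> rw [hw] <;> decide
      · exact h v
    rw [ih _ h']
    rw [PySem.Dict.getD_insert]
    have idem : PySem.Int.bor (PySem.Int.bor (d.getD w 0) 2) 2 = PySem.Int.bor (d.getD w 0) 2 := by
      rcases h w with hw | hw | hw | hw <;> rw [hw] <;> decide
    by_cases hv : v ∈ t
    · by_cases hvw : v = w
      · subst hvw; simp [hv, idem]
      · simp [hv, hvw]
    · by_cases hvw : v = w
      · subst hvw; simp [hv]
      · simp [hv, hvw]

-- Final loop over the dict items is (∃ mask-3 non-stopword, ∀ mask-3).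
theorem pv_fold_pair (l : List (String × Int)) (b1 b2 : Bool) :
    (l.foldl (fun (acc : Bool × Bool) wm =>
        if wm.2 == 3 then (if !(pvStopB.contains wm.1) then (true, acc.2) else acc)
        else (acc.1, false)) (b1, b2))
    = (b1 || l.any (fun wm => wm.2 == 3 && !(pvStopB.contains wm.1)),
       b2 && l.all (fun wm => wm.2 == 3)) := by
  induction l generalizing b1 b2 with
  | nil => simp
  | cons wm t ih =>
    simp only [List.foldl_cons, List.any_cons, List.all_cons]
    by_cases h3 : (wm.2 == 3) = true
    · by_cases hs : pvStopB.contains wm.1 = true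
      · rw [if_pos h3, if_neg (by simpa using hs), ih, h3, hs]; simp
      · rw [if_pos h3, if_pos (by simpa using hs), ih, h3]
        simp only [Bool.not_eq_true] at hs
        rw [hs]; simp
    · rw [if_neg h3, ih]
      simp only [Bool.not_eq_true] at h3
      rw [h3]; simp

-- The tail ("same business object") parts of the two ports agree for any two word lists.
theorem pv_tail_eq (l1 l2 : List String) :
    (let w1 := PySem.Set.ofList l1
     let w2 := PySem.Set.ofList l2
     let c := PySem.Set.inter w1 (PySem.Set.diff w2 (PySem.Set.ofList ["THE", "A", "AN", "AND", "OR"]))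
     if !c.isEmpty then
       if !(PySem.Set.equal (PySem.Set.diff w1 c) (PySem.Set.diff w2 c)) then true else false
     else false)
    = (let side0 := l1.foldl (fun (d : PySem.Dict String Int) w => d.insert w (PySem.Int.bor (d.getD w 0) 1)) PySem.Dict.empty
       let side := l2.foldl (fun (d : PySem.Dict String Int) w => d.insert w (PySem.Int.bor (d.getD w 0) 2)) side0
       let r := side.items.foldl
         (fun (acc : Bool × Bool) wm =>
           if wm.2 == 3 then (if !(pvStopB.contains wm.1) then (true, acc.2) else acc)
           else (acc.1, false)) (false, true)
       r.1 && !r.2) := by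
  simp only []
  set d1 := l1.foldl (fun (d : PySem.Dict String Int) w => d.insert w (PySem.Int.bor (d.getD w 0) 1)) PySem.Dict.empty with hd1eq
  set d2 := l2.foldl (fun (d : PySem.Dict String Int) w => d.insert w (PySem.Int.bor (d.getD w 0) 2)) d1 with hd2eq
  have h0 : ∀ v : String, (PySem.Dict.empty : PySem.Dict String Int).getD v 0 = 0 ∨
      (PySem.Dict.empty : PySem.Dict String Int).getD v 0 = 1 := fun _ => Or.inl rfl
  have hd1 : ∀ v, d1.getD v 0 = if v ∈ l1 then 1 else 0 := by
    intro v; rw [hd1eq, pv_fold1_getD _ _ h0 v]; rfl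
  have hd1' : ∀ v, d1.getD v 0 = 0 ∨ d1.getD v 0 = 1 ∨ d1.getD v 0 = 2 ∨ d1.getD v 0 = 3 := by
    intro v; rw [hd1 v]; split
    · right; left; rfl
    · left; rfl
  have hd2 : ∀ v, d2.getD v 0 = if v ∈ l2 then (if v ∈ l1 then 3 else 2) else (if v ∈ l1 then 1 else 0) := by
    intro v
    rw [hd2eq, pv_fold2_getD _ _ hd1' v, hd1 v]
    by_cases h2 : v ∈ l2 <;> by_cases h1 : v ∈ l1 <;> simp [h1, h2] <;> decide
  have hknd : d2.keys.Nodup := by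
    rw [hd2eq]
    apply PySem.Dict.nodup_keys_foldl_insert
    rw [hd1eq]
    apply PySem.Dict.nodup_keys_foldl_insert
    exact PySem.Dict.nodup_keys_empty
  have hkm : ∀ v, v ∈ d2.keys ↔ (v ∈ l1 ∨ v ∈ l2) := by
    intro v
    rw [hd2eq, PySem.Dict.keys_foldl_insert, hd1eq, PySem.Dict.keys_foldl_insert]
    simp [PySem.Set.mem_update, PySem.Dict.keys_empty]
  rw [PySem.Dict.items_eq_map_keys d2 hknd 0, pv_fold_pair]
  simp only [Bool.false_or, Bool.true_and, List.any_map, List.all_map, Function.comp_def]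
  have hL : (!((PySem.Set.inter (PySem.Set.ofList l1)
        (PySem.Set.diff (PySem.Set.ofList l2) (PySem.Set.ofList ["THE", "A", "AN", "AND", "OR"]))).isEmpty))
      = (decide (∃ v, v ∈ l1 ∧ v ∈ l2 ∧ v ∉ pvStopB)) := by
    rw [Bool.eq_iff_iff]
    simp [List.eq_nil_iff_forall_not_mem, PySem.Set.mem_inter, PySem.Set.mem_diff,
      PySem.Set.mem_ofList, pvStopB]
  have hR1 : (d2.keys.any fun k => d2.getD k 0 == 3 && !(pvStopB.contains k))
      = (decide (∃ v, v ∈ l1 ∧ v ∈ l2 ∧ v ∉ pvStopB)) := by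
    rw [Bool.eq_iff_iff]
    simp only [List.any_eq_true, Bool.and_eq_true, beq_iff_eq, Bool.not_eq_eq_eq_not,
      Bool.not_true, decide_eq_true_eq]
    constructor
    · rintro ⟨v, hv, h3, hs⟩
      rw [hkm v] at hv
      rw [hd2 v] at h3
      have hs' : v ∉ pvStopB := by simpa using hs
      by_cases h2 : v ∈ l2 <;> by_cases h1 : v ∈ l1 <;> simp [h1, h2] at h3
      exact ⟨v, h1, h2, hs'⟩
    · rintro ⟨v, h1, h2, hs⟩
      refine ⟨v, (hkm v).mpr (Or.inl h1), ?_, ?_⟩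
      · rw [hd2 v]; simp [h1, h2]
      · simpa using hs
  have hR2 : (d2.keys.all fun k => d2.getD k 0 == 3)
      = (decide ((∀ v ∈ l1, v ∈ l2) ∧ (∀ v ∈ l2, v ∈ l1))) := by
    rw [Bool.eq_iff_iff]
    simp only [List.all_eq_true, beq_iff_eq, decide_eq_true_eq]
    constructor
    · intro h
      constructor
      · intro v hv
        have := h v ((hkm v).mpr (Or.inl hv))
        rw [hd2 v] at this
        by_cases h2 : v ∈ l2
        · exact h2
        · simp [hv, h2] at this
      · intro v hv
        have := h v ((hkm v).mpr (Or.inr hv))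
        rw [hd2 v] at this
        by_cases h1 : v ∈ l1
        · exact h1
        · simp [hv, h1] at this
    · rintro ⟨h12, h21⟩ v hv
      rw [hkm v] at hv
      have h1 : v ∈ l1 := by
        rcases hv with h | h
        · exact h
        · exact h21 v h
      have h2 : v ∈ l2 := h12 v h1
      rw [hd2 v]; simp [h1, h2]
  have hEq : (PySem.Set.equal
        (PySem.Set.diff (PySem.Set.ofList l1)
          (PySem.Set.inter (PySem.Set.ofList l1) (PySem.Set.diff (PySem.Set.ofList l2) (PySem.Set.ofList ["THE", "A", "AN", "AND", "OR"]))))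
        (PySem.Set.diff (PySem.Set.ofList l2)
          (PySem.Set.inter (PySem.Set.ofList l1) (PySem.Set.diff (PySem.Set.ofList l2) (PySem.Set.ofList ["THE", "A", "AN", "AND", "OR"])))))
      = (decide ((∀ v ∈ l1, v ∈ l2) ∧ (∀ v ∈ l2, v ∈ l1))) := by
    rw [Bool.eq_iff_iff]
    rw [PySem.Set.equal_iff]
    simp only [PySem.Set.mem_diff, PySem.Set.mem_inter, PySem.Set.mem_ofList, decide_eq_true_eq]
    constructor
    · intro h
      constructor
      · intro w hw
        by_cases hc : w ∈ l1 ∧ w ∈ l2 ∧ w ∉ (["THE", "A", "AN", "AND", "OR"] : List String)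
        · exact hc.2.1
        · exact ((h w).mp ⟨hw, by simpa using hc⟩).1
      · intro w hw
        by_cases hc : w ∈ l1 ∧ w ∈ l2 ∧ w ∉ (["THE", "A", "AN", "AND", "OR"] : List String)
        · exact hc.1
        · exact ((h w).mpr ⟨hw, by simpa using hc⟩).1
    · rintro ⟨h12, h21⟩ w
      constructor
      · rintro ⟨hw, hnc⟩; exact ⟨h12 w hw, hnc⟩
      · rintro ⟨hw, hnc⟩; exact ⟨h21 w hw, hnc⟩
  rw [hL, hR1, hR2, hEq]
  cases decide (∃ v, v ∈ l1 ∧ v ∈ l2 ∧ v ∉ pvStopB) <;>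
    cases decide ((∀ v ∈ l1, v ∈ l2) ∧ (∀ v ∈ l2, v ∈ l1)) <;> simp

-- ===== VERDICT (by name: the statement is the Claim_ definition above) =====
-- contains on the filtered category table reads off the row's own match flag
theorem pv_contains_cat (f : String × List String → Bool) (n : String) (kws : List String)
    (hmem : (n, kws) ∈ pvCatsB) :
    PySem.Set.contains (PySem.Set.ofList ((pvCatsB.filter f).map Prod.fst)) n = f (n, kws) := by
  cases hf1 : f ("create", ["CREATE", "ADD", "INSERT", "NEW", "HIRE"]) <;>
  cases hf2 : f ("approve", ["APPROVE", "RELEASE", "POST", "EXECUTE", "PAY"]) <;>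
  cases hf3 : f ("modify", ["MODIFY", "CHANGE", "UPDATE", "EDIT"]) <;>
  cases hf4 : f ("delete", ["DELETE", "REMOVE", "RETIRE", "TERMINATE"]) <;>
  (simp [pvCatsB] at hmem;
   rcases hmem with ⟨hn, hk⟩ | ⟨hn, hk⟩ | ⟨hn, hk⟩ | ⟨hn, hk⟩ <;> subst hn <;> subst hk <;>
   simp [pvCatsB, hf1, hf2, hf3, hf4, PySem.Set.ofList, PySem.Set.add, PySem.Set.contains])

set_option maxHeartbeats 2000000 in
theorem looks_like_conflict_py_spec : Claim_equal_looks_like_conflict_py := by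
  intro action1 action2 _
  unfold Spec_looks_like_conflict_py looks_like_conflict_py looks_like_conflict_py_alt
  simp only []
  generalize PySem.Str.upper action1 = u1
  generalize PySem.Str.upper action2 = u2
  have hrules : ∀ (P : String × String → Bool), pvRulesB.any P
      = (P ("create", "approve") || (P ("approve", "create") || (P ("create", "delete") || (P ("modify", "approve") || false)))) := fun P => rfl
  rw [hrules]
  simp only [pv_contains_cat (fun p => p.2.any fun k => PySem.Str.isIn k u1) "create" ["CREATE", "ADD", "INSERT", "NEW", "HIRE"] (by simp [pvCatsB]),
     pv_contains_cat (fun p => p.2.any fun k => PySem.Str.isIn k u1) "approve" ["APPROVE", "RELEASE", "POST", "EXECUTE", "PAY"] (by simp [pvCatsB]),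
     pv_contains_cat (fun p => p.2.any fun k => PySem.Str.isIn k u1) "modify" ["MODIFY", "CHANGE", "UPDATE", "EDIT"] (by simp [pvCatsB]),
     pv_contains_cat (fun p => p.2.any fun k => PySem.Str.isIn k u2) "create" ["CREATE", "ADD", "INSERT", "NEW", "HIRE"] (by simp [pvCatsB]),
     pv_contains_cat (fun p => p.2.any fun k => PySem.Str.isIn k u2) "approve" ["APPROVE", "RELEASE", "POST", "EXECUTE", "PAY"] (by simp [pvCatsB]),
     pv_contains_cat (fun p => p.2.any fun k => PySem.Str.isIn k u2) "delete" ["DELETE", "REMOVE", "RETIRE", "TERMINATE"] (by simp [pvCatsB])]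
  rw [pv_tail_eq (PySem.Str.split₀ (PySem.Str.replace u1 "_" " ")) (PySem.Str.split₀ (PySem.Str.replace u2 "_" " "))]
  generalize (List.any ["CREATE", "ADD", "INSERT", "NEW", "HIRE"] fun k => PySem.Str.isIn k u1) = c1
  generalize (List.any ["CREATE", "ADD", "INSERT", "NEW", "HIRE"] fun k => PySem.Str.isIn k u2) = c2
  generalize (List.any ["APPROVE", "RELEASE", "POST", "EXECUTE", "PAY"] fun k => PySem.Str.isIn k u1) = a1
  generalize (List.any ["APPROVE", "RELEASE", "POST", "EXECUTE", "PAY"] fun k => PySem.Str.isIn k u2) = a2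
  generalize (List.any ["MODIFY", "CHANGE", "UPDATE", "EDIT"] fun k => PySem.Str.isIn k u1) = m1
  generalize (List.any ["DELETE", "REMOVE", "RETIRE", "TERMINATE"] fun k => PySem.Str.isIn k u2) = d2
  cases c1 <;> cases c2 <;> cases a1 <;> cases a2 <;> cases m1 <;> cases d2 <;> rfl
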